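-- pv_equiv track=rewrite | github.com/prashanth-7861/WireSeal | src/wireseal/client/config_store.py | validate_conf
-- ===== SOURCE A (Python) =====
-- def validate_conf(config_text: str) -> list[str]:
--     """Validate a WireGuard .conf file. Returns list of errors (empty = valid)."""
--     errors: list[str] = []
--     if not config_text.strip():
--         return ["Config file is empty"]
--
--     has_interface = False
--     has_peer = False
--     has_private_key = False
--
--     for line in config_text.splitlines():
--         stripped = line.strip().lower()
--         if stripped == "[interface]":
--             has_interface = True
--         elif stripped == "[peer]":
--             has_peer = True
--         elif stripped.startswith("privatekey") and has_interface:
--             has_private_key = True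
--
--     if not has_interface:
--         errors.append("Missing [Interface] section")
--     if not has_peer:
--         errors.append("Missing [Peer] section")
--     if not has_private_key:
--         errors.append("Missing PrivateKey in [Interface]")
--
--     return errors
-- ===== SOURCE B (Python) =====
-- def validate_conf(config_text: str) -> list[str]:
--     """Validate a WireGuard .conf file. Returns list of errors (empty = valid)."""
--     if not config_text.strip():
--         return ["Config file is empty"]
--
--     lines = [line.strip().lower() for line in config_text.splitlines()]
--
--     has_interface = "[interface]" in lines
--     has_peer = "[peer]" in lines
--
--     if has_interface:
--         first = lines.index("[interface]")
--         has_private_key = any(l.startswith("privatekey") for l in lines[first + 1:])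
--     else:
--         has_private_key = False
--
--     missing = [
--         (has_interface, "Missing [Interface] section"),
--         (has_peer, "Missing [Peer] section"),
--         (has_private_key, "Missing PrivateKey in [Interface]"),
--     ]
--     return [msg for ok, msg in missing if not ok]
-- ===== Notes on version B (the rewrite author's own statement) =====
-- stated objective: idiomatic
-- what changed: Replaces the single three-flag accumulating loop by independent determinations on a once-normalized line list: membership tests for the two headers, index-of-first-[interface] plus an any() over the suffix for the key, and a declarative missing-messages table instead of sequential appends.
import Mathlib
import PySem

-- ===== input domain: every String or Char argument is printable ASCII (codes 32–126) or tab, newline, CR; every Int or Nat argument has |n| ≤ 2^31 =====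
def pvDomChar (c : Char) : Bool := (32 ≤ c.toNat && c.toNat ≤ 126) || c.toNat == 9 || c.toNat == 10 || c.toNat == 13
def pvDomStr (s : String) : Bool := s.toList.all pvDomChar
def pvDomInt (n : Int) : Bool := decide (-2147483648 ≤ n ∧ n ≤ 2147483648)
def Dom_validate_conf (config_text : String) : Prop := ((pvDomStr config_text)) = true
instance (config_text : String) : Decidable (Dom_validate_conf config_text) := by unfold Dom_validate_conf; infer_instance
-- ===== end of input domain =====

-- B replaces A's single three-flag loop with independent scans over a once-normalized
-- line list and a declarative missing-messages table (objective: more idiomatic).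

-- ===== PORT A =====
-- line.strip().lower()
def pvNorm (line : String) : String := PySem.Str.lower (PySem.Str.strip line)

-- stripped.startswith("privatekey")
def pvSw (l : String) : Bool := PySem.Str.startswith l "privatekey"

-- the body of A's for-loop over the three flags (has_interface, has_peer, has_private_key)
def pvStepA (s : Bool × Bool × Bool) (line : String) : Bool × Bool × Bool :=
  let stripped := pvNorm line
  if stripped = "[interface]" then (true, s.2.1, s.2.2)
  else if stripped = "[peer]" then (s.1, true, s.2.2)
  else if pvSw stripped && s.1 then (s.1, s.2.1, true)
  else s

def validate_conf (config_text : String) : List String :=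
  if PySem.Str.strip config_text = "" then ["Config file is empty"]
  else
    let st := (PySem.Str.splitlines config_text).foldl pvStepA (false, false, false)
    (if st.1 = false then ["Missing [Interface] section"] else []) ++
    (if st.2.1 = false then ["Missing [Peer] section"] else []) ++
    (if st.2.2 = false then ["Missing PrivateKey in [Interface]"] else [])

-- ===== PORT B =====
def validate_conf_alt (config_text : String) : List String :=
  if PySem.Str.strip config_text = "" then ["Config file is empty"]
  else
    let lines := (PySem.Str.splitlines config_text).map pvNorm
    let has_interface := lines.contains "[interface]"
    let has_peer := lines.contains "[peer]"
    let has_private_key :=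
      if has_interface then
        match PySem.List.index? lines "[interface]" with
        | some first => (PySem.List.slice lines (some ((first : Int) + 1)) none).any pvSw
        | none => false  -- unreachable: has_interface guarantees membership
      else false
    ([(has_interface, "Missing [Interface] section"),
      (has_peer, "Missing [Peer] section"),
      (has_private_key, "Missing PrivateKey in [Interface]")]).filterMap
      (fun p => if p.1 then none else some p.2)

-- ===== PRECONDITION & SPEC =====
def Spec_validate_conf (config_text : String) (out : List String) : Prop := out = validate_conf_alt config_text
instance (config_text : String) (out : List String) : Decidable (Spec_validate_conf config_text out) := by unfold Spec_validate_conf; infer_instance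

-- ===== CLAIM (what is proved, stated in full; the proofs are below) =====
def Claim_equal_validate_conf : Prop := ∀ (config_text : String), Dom_validate_conf config_text → Spec_validate_conf config_text (validate_conf config_text)

-- ===== LEMMAS AND PROOFS =====

-- has_private_key, characterized recursively over the (normalized) lines with the
-- current has_interface flag as parameter
def pvPkF : Bool → List String → Bool
  | _, [] => false
  | hi, l :: ls =>
    if l = "[interface]" then pvPkF true ls
    else if l = "[peer]" then pvPkF hi ls
    else if pvSw l && hi then true
    else pvPkF hi ls

lemma pvFold_char (ls : List String) (hi hp hpk : Bool) :
    ls.foldl pvStepA (hi, hp, hpk) =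
      (hi || (ls.map pvNorm).contains "[interface]",
       hp || (ls.map pvNorm).contains "[peer]",
       hpk || pvPkF hi (ls.map pvNorm)) := by
  induction ls generalizing hi hp hpk with
  | nil => simp [pvPkF]
  | cons l ls ih =>
    simp only [List.foldl_cons, List.map_cons, List.contains_cons, pvPkF]
    by_cases h1 : pvNorm l = "[interface]"
    · have hstep : pvStepA (hi, hp, hpk) l = (true, hp, hpk) := by simp [pvStepA, h1]
      rw [hstep, ih]; simp [h1]
    · by_cases h2 : pvNorm l = "[peer]"
      · have hstep : pvStepA (hi, hp, hpk) l = (hi, true, hpk) := by simp [pvStepA, h2]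
        rw [hstep, ih]; simp [h2]
      · by_cases h3 : (pvSw (pvNorm l) && hi) = true
        · have hb1 : ("[interface]" == pvNorm l) = false := beq_eq_false_iff_ne.mpr (Ne.symm h1)
          have hb2 : ("[peer]" == pvNorm l) = false := beq_eq_false_iff_ne.mpr (Ne.symm h2)
          have hstep : pvStepA (hi, hp, hpk) l = (hi, hp, true) := by
            simp only [pvStepA]; rw [if_neg h1, if_neg h2, if_pos h3]
          rw [hstep, ih]
          simp only [hb1, hb2, Bool.false_or, if_neg h1, if_neg h2, if_pos h3]
          simp
        · have hb1 : ("[interface]" == pvNorm l) = false := beq_eq_false_iff_ne.mpr (Ne.symm h1)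
          have hb2 : ("[peer]" == pvNorm l) = false := beq_eq_false_iff_ne.mpr (Ne.symm h2)
          have hstep : pvStepA (hi, hp, hpk) l = (hi, hp, hpk) := by
            simp only [pvStepA]; rw [if_neg h1, if_neg h2, if_neg h3]
          rw [hstep, ih]
          simp only [hb1, hb2, Bool.false_or, if_neg h1, if_neg h2, if_neg h3]

lemma pvPkF_true (ls : List String) : pvPkF true ls = ls.any pvSw := by
  induction ls with
  | nil => simp [pvPkF]
  | cons l ls ih =>
    simp only [pvPkF, List.any_cons]
    by_cases h1 : l = "[interface]"
    · subst h1; simpa [pvSw] using ih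
    · by_cases h2 : l = "[peer]"
      · subst h2; simpa [pvSw] using ih
      · by_cases h3 : pvSw l
        · simp [h1, h2, h3]
        · simp [h1, h2, h3, ih]

lemma pvPkF_false (ls : List String) :
    pvPkF false ls =
      (match PySem.List.index? ls "[interface]" with
       | some first => (PySem.List.slice ls (some ((first : Int) + 1)) none).any pvSw
       | none => false) := by
  induction ls with
  | nil => simp [pvPkF, PySem.List.index?]
  | cons l ls ih =>
    by_cases h1 : l = "[interface]"
    · subst h1
      rw [PySem.List.index?_cons_self]
      simp only [pvPkF, if_true]
      rw [pvPkF_true]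
      have h01 : ((0 : Nat) : Int) + 1 = ((1 : Nat) : Int) := by norm_num
      rw [h01, PySem.List.slice_from_natCast]
      simp
    · have hidx := PySem.List.index?_cons_of_ne (x := l) (xs := ls) (v := "[interface]") h1
      have hL : pvPkF false (l :: ls) = pvPkF false ls := by
        by_cases h2 : l = "[peer]" <;> simp [pvPkF, h1, h2]
      rw [hL, ih, hidx]
      cases hix : PySem.List.index? ls "[interface]" with
      | none => simp
      | some i =>
        simp only [Option.map_some]
        have hcast : ((i + 1 : Nat) : Int) + 1 = ((i + 2 : Nat) : Int) := by push_cast; ring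
        rw [hcast, PySem.List.slice_from_natCast]
        have hc2 : ((i : Nat) : Int) + 1 = ((i + 1 : Nat) : Int) := by push_cast; ring
        rw [hc2, PySem.List.slice_from_natCast]
        simp

lemma pvPk_eq (ls : List String) :
    (if ls.contains "[interface]" then
       match PySem.List.index? ls "[interface]" with
       | some first => (PySem.List.slice ls (some ((first : Int) + 1)) none).any pvSw
       | none => false
     else false) = pvPkF false ls := by
  rw [pvPkF_false]
  by_cases hc : ls.contains "[interface]" = true
  · rw [if_pos hc]
  · have hnone : PySem.List.index? ls "[interface]" = none := by
      rw [PySem.List.index?_eq_none_iff]; simpa using hc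
    rw [if_neg hc, hnone]

-- A's three sequential appends equal B's filterMap over the table, for any flags
lemma pvOut (b1 b2 b3 : Bool) :
    ((if b1 = false then ["Missing [Interface] section"] else []) ++
     (if b2 = false then ["Missing [Peer] section"] else []) ++
     (if b3 = false then ["Missing PrivateKey in [Interface]"] else [])) =
    ([(b1, "Missing [Interface] section"),
      (b2, "Missing [Peer] section"),
      (b3, "Missing PrivateKey in [Interface]")]).filterMap
      (fun p => if p.1 then none else some p.2) := by
  cases b1 <;> cases b2 <;> cases b3 <;> rfl

-- ===== VERDICT (by name: the statement is the Claim_ definition above) =====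
theorem validate_conf_spec : Claim_equal_validate_conf := by
  intro config_text _
  unfold Spec_validate_conf validate_conf validate_conf_alt
  by_cases h0 : PySem.Str.strip config_text = ""
  · simp [h0]
  · rw [if_neg h0, if_neg h0]
    simp only [pvFold_char, Bool.false_or]
    rw [← pvPk_eq]
    exact pvOut _ _ _
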